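-- pv_equiv track=rewrite | github.com/Haksell/codeforces | 1992D.py | solve
-- ===== SOURCE A (Python) =====
-- def solve(n, m, k, a):
--     a = ["L", *a, "L"]
--     i = 0
--     while i < len(a) - 1:
--         if a[i] == "C":
--             return False
--         elif a[i] == "W":
--             i += 1
--             if k == 0:
--                 return False
--             k -= 1
--         else:
--             for j in range(1, m + 1):
--                 if a[i + j] == "L":
--                     i += j
--                     break
--             else:
--                 i += m
--     return True
-- ===== SOURCE B (Python) =====
-- def solve(n, m, k, a):
--     b = ["L", *a, "L"]
--     L = len(b)
--     # nxt[i] = smallest j >= i with b[j] == "L" (L if none); built in one right-to-left pass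
--     nxt = [L] * (L + 1)
--     for i in range(L - 1, -1, -1):
--         nxt[i] = i if b[i] == "L" else nxt[i + 1]
--     i = 0
--     while i < L - 1:
--         c = b[i]
--         if c == "C":
--             return False
--         if c == "W":
--             if k == 0:
--                 return False
--             k -= 1
--             i += 1
--         else:
--             t = nxt[i + 1]
--             i = t if t <= i + m else i + m
--     return True
-- ===== Notes on version B (the rewrite author's own statement) =====
-- stated objective: alternative
-- what changed: Replaces A's per-jump forward scan for the next 'L' with a next-'L' table precomputed in one right-to-left pass, so each jump is an O(1) table lookup.
-- outside the precondition, e.g. on solve(1, -1, 0, ['W']): A returns False, B returns False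
import Mathlib
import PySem

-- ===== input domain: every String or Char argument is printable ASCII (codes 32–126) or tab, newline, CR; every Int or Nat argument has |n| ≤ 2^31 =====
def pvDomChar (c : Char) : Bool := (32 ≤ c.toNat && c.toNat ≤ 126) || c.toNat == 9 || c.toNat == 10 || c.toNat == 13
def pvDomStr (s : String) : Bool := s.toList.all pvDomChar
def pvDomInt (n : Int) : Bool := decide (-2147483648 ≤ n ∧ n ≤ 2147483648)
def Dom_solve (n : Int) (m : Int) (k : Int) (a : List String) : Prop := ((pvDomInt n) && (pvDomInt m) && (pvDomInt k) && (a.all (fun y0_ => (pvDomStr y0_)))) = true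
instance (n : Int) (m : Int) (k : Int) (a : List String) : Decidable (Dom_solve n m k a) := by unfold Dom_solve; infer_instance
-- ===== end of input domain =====

-- B replaces A's per-jump forward scan for the next "L" with a next-"L" table built in one
-- right-to-left pass, so each jump is an O(1) lookup (alternative algorithm, similar cost).

-- ===== PORT A =====
-- inner 'for j in range(1, m + 1): … else: i += m' of A
def solveScan (b : List String) (m i : Int) (j : Int) : Int :=
  if _h : j ≤ m then
    if PySem.List.pyGetD b (i + j) "" == "L" then i + j
    else solveScan b m i (j + 1)
  else i + m
termination_by (m + 1 - j).toNat
decreasing_by omega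

-- outer 'while i < len(a) - 1' of A (fuel is unreachable-0-padded; under Pre_ it suffices)
def solveLoop (b : List String) (m : Int) : Nat → Int → Int → Bool
  | 0, _, _ => true
  | fuel + 1, i, k =>
    if i < (b.length : Int) - 1 then
      if PySem.List.pyGetD b i "" == "C" then false
      else if PySem.List.pyGetD b i "" == "W" then
        if k == 0 then false else solveLoop b m fuel (i + 1) (k - 1)
      else solveLoop b m fuel (solveScan b m i 1) k
    else true

def solve (n : Int) (m : Int) (k : Int) (a : List String) : Bool :=
  solveLoop ("L" :: a ++ ["L"]) m (a.length + 2) 0 k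

-- ===== PORT B =====
-- 'nxt[i] = i if b[i] == "L" else nxt[i+1]', built right-to-left (value for a missing tail is len)
def buildNxt (i : Int) : List String → List Int
  | [] => []
  | c :: rest =>
    let tail := buildNxt (i + 1) rest
    (if c == "L" then i else tail.headD (i + 1)) :: tail

def solveAltLoop (b : List String) (nxt : List Int) (m : Int) : Nat → Int → Int → Bool
  | 0, _, _ => true
  | fuel + 1, i, k =>
    if i < (b.length : Int) - 1 then
      if PySem.List.pyGetD b i "" == "C" then false
      else if PySem.List.pyGetD b i "" == "W" then
        if k == 0 then false else solveAltLoop b nxt m fuel (i + 1) (k - 1)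
      else
        let t := PySem.List.pyGetD nxt (i + 1) (b.length : Int)
        solveAltLoop b nxt m fuel (if t ≤ i + m then t else i + m) k
    else true

def solve_alt (n : Int) (m : Int) (k : Int) (a : List String) : Bool :=
  let b := "L" :: a ++ ["L"]
  solveAltLoop b (buildNxt 0 b) m (a.length + 2) 0 k

-- ===== PRECONDITION & SPEC =====
-- Pre_ excludes m ≤ 0: there the Python A does not terminate normally (m = 0 loops forever on the
-- starting bank; m < 0 walks left by negative-index wraparound and diverges, raises IndexError, or
-- returns only by that accidental wraparound).
def Pre_solve (n : Int) (m : Int) (k : Int) (a : List String) : Prop := 1 ≤ m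
instance (n : Int) (m : Int) (k : Int) (a : List String) : Decidable (Pre_solve n m k a) := by unfold Pre_solve; infer_instance
def pvWitness_solve : Int × Int × Int × List String := (2, 2, 1, ["W", "L"])

def Spec_solve (n : Int) (m : Int) (k : Int) (a : List String) (out : Bool) : Prop := out = solve_alt n m k a
instance (n : Int) (m : Int) (k : Int) (a : List String) (out : Bool) : Decidable (Spec_solve n m k a out) := by unfold Spec_solve; infer_instance

-- ===== CLAIM (what is proved, stated in full; the proofs are below) =====
def Claim_equal_solve : Prop := ∀ (n : Int) (m : Int) (k : Int) (a : List String), Dom_solve n m k a → Pre_solve n m k a → Spec_solve n m k a (solve n m k a)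

-- ===== LEMMAS AND PROOFS =====

lemma buildNxt_cons (i0 : Int) (c : String) (rest : List String) :
    buildNxt i0 (c :: rest)
      = (if c == "L" then i0 else (buildNxt (i0 + 1) rest).headD (i0 + 1)) :: buildNxt (i0 + 1) rest := rfl

/-- `buildNxt i0 l` at position `q` is the first "L"-position at or after `q` (offset by `i0`),
or `i0 + l.length` if there is none. -/
lemma buildNxt_spec (l : List String) (i0 : Int) (q : Nat) (hq : q < l.length) :
    ∃ t : Int, (buildNxt i0 l)[q]? = some t ∧ i0 + q ≤ t ∧
      ((∃ r : Nat, r < l.length ∧ t = i0 + r ∧ l.getD r "" = "L" ∧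
          ∀ s : Nat, q ≤ s → s < r → l.getD s "" ≠ "L")
       ∨ (t = i0 + l.length ∧ ∀ s : Nat, q ≤ s → s < l.length → l.getD s "" ≠ "L")) := by
  induction l generalizing i0 q with
  | nil => simp at hq
  | cons c rest ih =>
    cases q with
    | zero =>
      by_cases hc : c == "L"
      · refine ⟨i0, by simp [buildNxt, hc], by omega, Or.inl ⟨0, by simp, by push_cast; ring, ?_, ?_⟩⟩
        · simpa using (beq_iff_eq.mp hc)
        · intro s _ hs; omega
      · cases rest with
        | nil =>
          refine ⟨i0 + 1, by simp [buildNxt, hc], by omega, Or.inr ⟨by simp, ?_⟩⟩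
          intro s _ hs
          have hs0 : s = 0 := by simp at hs; omega
          subst hs0
          simpa using (fun h => hc (beq_iff_eq.mpr h))
        | cons d rest' =>
          obtain ⟨t, hget, hle, hdisj⟩ := ih (i0 + 1) 0 (by simp)
          have hhead : (buildNxt (i0 + 1) (d :: rest')).headD (i0 + 1) = t := by
            cases hb : buildNxt (i0 + 1) (d :: rest') with
            | nil => simp [hb] at hget
            | cons x xs => simp [hb] at hget ⊢; simpa using hget
          refine ⟨t, by rw [buildNxt_cons, if_neg (by simpa using hc)]; simpa [List.headD] using hhead, by omega, ?_⟩
          rcases hdisj with ⟨r, hr, ht, hLr, hmin⟩ | ⟨ht, hnone⟩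
          · refine Or.inl ⟨r + 1, by simpa using Nat.succ_lt_succ hr, by push_cast at ht ⊢; omega, by simpa using hLr, ?_⟩
            intro s _ hs
            cases s with
            | zero => simpa using (fun h => hc (beq_iff_eq.mpr h))
            | succ s' => simpa using hmin s' (by omega) (by omega)
          · refine Or.inr ⟨by simp only [List.length_cons] at ht ⊢; push_cast at ht ⊢; omega, ?_⟩
            intro s _ hs
            cases s with
            | zero => simpa using (fun h => hc (beq_iff_eq.mpr h))
            | succ s' => simpa using hnone s' (by omega) (by simpa using hs)
    | succ q' =>
      obtain ⟨t, hget, hle, hdisj⟩ := ih (i0 + 1) q' (by simpa using hq)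
      refine ⟨t, by rw [buildNxt_cons]; simpa using hget, by push_cast at hle ⊢; omega, ?_⟩
      rcases hdisj with ⟨r, hr, ht, hLr, hmin⟩ | ⟨ht, hnone⟩
      · refine Or.inl ⟨r + 1, by simpa using Nat.succ_lt_succ hr, by push_cast at ht ⊢; omega, by simpa using hLr, ?_⟩
        intro s hqs hs
        cases s with
        | zero => omega
        | succ s' => simpa using hmin s' (by omega) (by omega)
      · refine Or.inr ⟨by simp only [List.length_cons] at ht ⊢; push_cast at ht ⊢; omega, ?_⟩
        intro s hqs hs
        cases s with
        | zero => omega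
        | succ s' => simpa using hnone s' (by omega) (by simpa using hs)

lemma solveScan_eq (b : List String) (m i t : Int)
    (hL : PySem.List.pyGetD b t "" = "L")
    (hmin : ∀ r : Int, i + 1 ≤ r → r < t → PySem.List.pyGetD b r "" ≠ "L")
    (j : Int) (h1 : 1 ≤ j) (hjt : i + j ≤ t) :
    solveScan b m i j = if t ≤ i + m then t else i + m := by
  rw [solveScan]
  by_cases hjm : j ≤ m
  · simp only [hjm, dif_pos]
    by_cases hfound : PySem.List.pyGetD b (i + j) "" == "L"
    · have heq : i + j = t := by
        by_contra hne
        exact hmin (i + j) (by omega) (by omega) (by simpa using hfound)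
      simp only [hfound, if_pos]
      rw [heq, if_pos (by omega)]
    · have hlt : i + j < t := by
        rcases lt_or_eq_of_le hjt with h | h
        · exact h
        · exact absurd (h ▸ hL) (by simpa using hfound)
      simp only [hfound, if_neg, Bool.false_eq_true, not_false_iff]
      exact solveScan_eq b m i t hL hmin (j + 1) (by omega) (by omega)
  · simp only [hjm, dif_neg, not_false_iff]
    rw [if_neg (by omega)]
termination_by (t - i - j).toNat
decreasing_by omega

lemma last_is_L (a : List String) :
    PySem.List.pyGetD ("L" :: a ++ ["L"]) ((a.length : Int) + 1) "" = "L" := by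
  have h : ((a.length : Int) + 1) = ((a.length + 1 : Nat) : Int) := by push_cast; ring
  rw [h, PySem.List.pyGetD_natCast]
  simp [List.getD_eq_getElem?_getD]

/-- A's scan from `i` equals B's table-driven jump, and the landing spot is nonnegative. -/
lemma jump_eq (a : List String) (m i : Int) (hm : 1 ≤ m) (hi : 0 ≤ i)
    (hcond : i < ((("L" :: a ++ ["L"]).length : Int) - 1)) :
    solveScan ("L" :: a ++ ["L"]) m i 1
      = (if PySem.List.pyGetD (buildNxt 0 ("L" :: a ++ ["L"])) (i + 1) ((("L" :: a ++ ["L"]).length : Int)) ≤ i + m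
         then PySem.List.pyGetD (buildNxt 0 ("L" :: a ++ ["L"])) (i + 1) ((("L" :: a ++ ["L"]).length : Int))
         else i + m)
    ∧ 0 ≤ solveScan ("L" :: a ++ ["L"]) m i 1 := by
  have hlen : ("L" :: a ++ ["L"]).length = a.length + 2 := by
    simp [List.length_cons, List.length_append]
  rw [hlen] at hcond
  have hq : (i + 1).toNat < ("L" :: a ++ ["L"]).length := by rw [hlen]; omega
  obtain ⟨t, hget, hle, hdisj⟩ := buildNxt_spec ("L" :: a ++ ["L"]) 0 (i + 1).toNat hq
  have hqcast : (((i + 1).toNat : Nat) : Int) = i + 1 := Int.toNat_of_nonneg (by omega)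
  have hgetD : PySem.List.pyGetD (buildNxt 0 ("L" :: a ++ ["L"])) (i + 1) ((("L" :: a ++ ["L"]).length : Int)) = t := by
    rw [← hqcast, PySem.List.pyGetD_natCast, List.getD_eq_getElem?_getD, hget]
    rfl
  have hlast : ("L" :: a ++ ["L"]).getD (a.length + 1) "" = "L" := by
    have h2 := last_is_L a
    rw [show ((a.length : Int) + 1) = ((a.length + 1 : Nat) : Int) by push_cast; ring,
        PySem.List.pyGetD_natCast] at h2
    exact h2
  rcases hdisj with ⟨r, _hr, ht, hLr, hmin⟩ | ⟨_ht, hnone⟩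
  · have htr : t = (r : Int) := by simpa using ht
    have hL' : PySem.List.pyGetD ("L" :: a ++ ["L"]) (r : Int) "" = "L" := by
      rw [PySem.List.pyGetD_natCast]
      simpa [List.getD_eq_getElem?_getD] using hLr
    have hmin' : ∀ rr : Int, i + 1 ≤ rr → rr < (r : Int) →
        PySem.List.pyGetD ("L" :: a ++ ["L"]) rr "" ≠ "L" := by
      intro rr h1 h2
      rw [show rr = ((rr.toNat : Nat) : Int) from (Int.toNat_of_nonneg (by omega)).symm,
          PySem.List.pyGetD_natCast]
      have := hmin rr.toNat (by omega) (by omega)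
      simpa [List.getD_eq_getElem?_getD] using this
    have hscan := solveScan_eq ("L" :: a ++ ["L"]) m i (r : Int) hL' hmin' 1 le_rfl (by omega)
    constructor
    · rw [hscan, hgetD, htr]
    · rw [hscan]; split_ifs <;> omega
  · exact absurd hlast (hnone (a.length + 1) (by omega) (by rw [hlen]; omega))

lemma loop_eq (a : List String) (m : Int) (hm : 1 ≤ m) (fuel : Nat) :
    ∀ (i k : Int), 0 ≤ i →
      solveLoop ("L" :: a ++ ["L"]) m fuel i k
        = solveAltLoop ("L" :: a ++ ["L"]) (buildNxt 0 ("L" :: a ++ ["L"])) m fuel i k := by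
  induction fuel with
  | zero => intro i k _; rfl
  | succ f ih =>
    intro i k hi
    simp only [solveLoop, solveAltLoop]
    by_cases hcond : i < ((("L" :: a ++ ["L"]).length : Int) - 1)
    · rw [if_pos hcond, if_pos hcond]
      by_cases hC : (PySem.List.pyGetD ("L" :: a ++ ["L"]) i "" == "C") = true
      · rw [if_pos hC, if_pos hC]
      · rw [if_neg hC, if_neg hC]
        by_cases hW : (PySem.List.pyGetD ("L" :: a ++ ["L"]) i "" == "W") = true
        · rw [if_pos hW, if_pos hW]
          by_cases hk : (k == 0) = true
          · rw [if_pos hk, if_pos hk]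
          · rw [if_neg hk, if_neg hk]
            exact ih (i + 1) (k - 1) (by omega)
        · rw [if_neg hW, if_neg hW]
          obtain ⟨hje, hpos⟩ := jump_eq a m i hm hi hcond
          rw [hje]
          exact ih _ k (hje ▸ hpos)
    · rw [if_neg hcond, if_neg hcond]

-- ===== VERDICT (by name: the statement is the Claim_ definition above) =====
theorem solve_spec : Claim_equal_solve := by
  intro n m k a _hdom hm
  unfold Spec_solve solve solve_alt
  exact loop_eq a m hm (a.length + 2) 0 k le_rfl
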